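-- pv_equiv track=rewrite | github.com/alexandersoen/aoc2024 | day2.py | monotonic_within_jump_num_sat
-- ===== SOURCE A (Python) =====
-- def level_is_safe(
--     level: list[int],
--     min_jump: int = 1,
--     max_jump: int = 3,
--     error_allowed: bool = False,
-- ) -> bool:
--     diffs = [b - a for a, b in zip(level, level[1:])]
--     monotonic = all(v >= 0 for v in diffs) or all(v <= 0 for v in diffs)
--     in_bounds = all(min_jump <= abs(v) <= max_jump for v in diffs)
--
--     if monotonic and in_bounds:
--         return True
--     elif error_allowed:
--         for i in range(len(level)):
--             new_level = level[:i] + level[i + 1 :]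
--             if level_is_safe(
--                 new_level,
--                 min_jump,
--                 max_jump,
--                 error_allowed=False,
--             ):
--                 return True
--
--     return False
--
-- def monotonic_within_jump_num_sat(
--     levels: list[list[int]],
--     min_jump: int = 1,
--     max_jump: int = 3,
--     error_allowed: bool = False,
-- ) -> int:
--     count = 0
--
--     for level in levels:
--         is_safe = level_is_safe(
--             level, min_jump, max_jump, error_allowed=error_allowed
--         )
--         count += int(is_safe)
--
--     return count
-- ===== SOURCE B (Python) =====
-- def monotonic_within_jump_num_sat(
--     levels,
--     min_jump=1,
--     max_jump=3,
--     error_allowed=False,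
-- ):
--     def ok_up(a, b):
--         d = b - a
--         return d >= 0 and min_jump <= abs(d) <= max_jump
--
--     def ok_down(a, b):
--         d = b - a
--         return d <= 0 and min_jump <= abs(d) <= max_jump
--
--     def first_bad(lvl, ok):
--         for k in range(len(lvl) - 1):
--             if not ok(lvl[k], lvl[k + 1]):
--                 return k
--         return None
--
--     def safe0(lvl):
--         return first_bad(lvl, ok_up) is None or first_bad(lvl, ok_down) is None
--
--     def safe(lvl):
--         iu = first_bad(lvl, ok_up)
--         idn = first_bad(lvl, ok_down)
--         if iu is None or idn is None:
--             return True
--         if not error_allowed: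
--             return False
--         # only deleting an element of a bad adjacent pair can help
--         return any(
--             safe0(lvl[:j] + lvl[j + 1:])
--             for j in (iu, iu + 1, idn, idn + 1)
--         )
--
--     count = 0
--     for lvl in levels:
--         count += int(safe(lvl))
--     return count
-- ===== Notes on version B (the rewrite author's own statement) =====
-- stated objective: faster
-- what changed: A repairs an unsafe level by re-checking the level with every single element deleted (O(n^2) per level); B locates one violating adjacent pair per direction in a single scan and tests only the at-most-4 deletions touching those pairs, since deleting any other element leaves the violating pair adjacent.
import Mathlib
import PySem

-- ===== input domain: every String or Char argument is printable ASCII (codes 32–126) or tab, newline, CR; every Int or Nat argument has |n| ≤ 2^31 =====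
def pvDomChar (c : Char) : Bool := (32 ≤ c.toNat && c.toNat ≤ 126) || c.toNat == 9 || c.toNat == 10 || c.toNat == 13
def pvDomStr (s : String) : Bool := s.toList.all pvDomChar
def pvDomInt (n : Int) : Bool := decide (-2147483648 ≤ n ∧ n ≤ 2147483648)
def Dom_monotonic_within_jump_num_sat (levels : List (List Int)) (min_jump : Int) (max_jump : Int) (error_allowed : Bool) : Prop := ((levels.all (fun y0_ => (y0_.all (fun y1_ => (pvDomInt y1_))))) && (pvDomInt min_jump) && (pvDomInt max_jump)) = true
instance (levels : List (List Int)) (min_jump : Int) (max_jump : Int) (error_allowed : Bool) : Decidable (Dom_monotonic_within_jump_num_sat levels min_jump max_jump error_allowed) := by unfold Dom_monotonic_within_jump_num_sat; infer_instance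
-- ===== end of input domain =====

-- B replaces A's try-every-deletion O(n²) repair scan by testing only the ≤4 deletions
-- adjacent to a failing pair (one per direction), an asymptotically faster exact algorithm.

-- ===== PORT A =====
-- literal port of level_is_safe; the recursive call always passes error_allowed=False
def pvA_level_is_safe (level : List Int) (min_jump max_jump : Int) (error_allowed : Bool) : Bool :=
  let diffs := (level.zip (level.drop 1)).map (fun p => p.2 - p.1)
  let monotonic := diffs.all (fun v => decide (0 ≤ v)) || diffs.all (fun v => decide (v ≤ 0))
  let in_bounds := diffs.all (fun v => decide (min_jump ≤ |v|) && decide (|v| ≤ max_jump))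
  if monotonic && in_bounds then true
  else if error_allowed then
    (List.range level.length).any (fun i =>
      pvA_level_is_safe (level.take i ++ level.drop (i+1)) min_jump max_jump false)
  else false
termination_by (if error_allowed then 1 else 0)
decreasing_by simp_all

def monotonic_within_jump_num_sat (levels : List (List Int)) (min_jump : Int) (max_jump : Int) (error_allowed : Bool) : Int :=
  levels.foldl (fun count level =>
    count + (if pvA_level_is_safe level min_jump max_jump error_allowed then 1 else 0)) 0

-- ===== PORT B =====
def pvOkUp (min_jump max_jump a b : Int) : Bool :=
  decide (0 ≤ b - a) && (decide (min_jump ≤ |b - a|) && decide (|b - a| ≤ max_jump))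

def pvOkDown (min_jump max_jump a b : Int) : Bool :=
  decide (b - a ≤ 0) && (decide (min_jump ≤ |b - a|) && decide (|b - a| ≤ max_jump))

-- index of the first adjacent pair violating ok, if any (python first_bad)
def pvFirstBad (ok : Int → Int → Bool) : List Int → Option Nat
  | a :: b :: rest => if ok a b then (pvFirstBad ok (b :: rest)).map (· + 1) else some 0
  | _ => none

def pvSafe0 (min_jump max_jump : Int) (lvl : List Int) : Bool :=
  (pvFirstBad (pvOkUp min_jump max_jump) lvl).isNone ||
  (pvFirstBad (pvOkDown min_jump max_jump) lvl).isNone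

def pvB_safe (lvl : List Int) (min_jump max_jump : Int) (error_allowed : Bool) : Bool :=
  match pvFirstBad (pvOkUp min_jump max_jump) lvl, pvFirstBad (pvOkDown min_jump max_jump) lvl with
  | none, _ => true
  | some _, none => true
  | some iu, some idn =>
    if error_allowed then
      [iu, iu+1, idn, idn+1].any (fun j =>
        pvSafe0 min_jump max_jump (lvl.take j ++ lvl.drop (j+1)))
    else false

def monotonic_within_jump_num_sat_alt (levels : List (List Int)) (min_jump : Int) (max_jump : Int) (error_allowed : Bool) : Int :=
  levels.foldl (fun count lvl =>
    count + (if pvB_safe lvl min_jump max_jump error_allowed then 1 else 0)) 0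

-- ===== PRECONDITION & SPEC =====
def Spec_monotonic_within_jump_num_sat (levels : List (List Int)) (min_jump : Int) (max_jump : Int) (error_allowed : Bool) (out : Int) : Prop := out = monotonic_within_jump_num_sat_alt levels min_jump max_jump error_allowed
instance (levels : List (List Int)) (min_jump : Int) (max_jump : Int) (error_allowed : Bool) (out : Int) : Decidable (Spec_monotonic_within_jump_num_sat levels min_jump max_jump error_allowed out) := by unfold Spec_monotonic_within_jump_num_sat; infer_instance

-- ===== CLAIM (what is proved, stated in full; the proofs are below) =====
def Claim_equal_monotonic_within_jump_num_sat : Prop := ∀ (levels : List (List Int)) (min_jump : Int) (max_jump : Int) (error_allowed : Bool), Dom_monotonic_within_jump_num_sat levels min_jump max_jump error_allowed → Spec_monotonic_within_jump_num_sat levels min_jump max_jump error_allowed (monotonic_within_jump_num_sat levels min_jump max_jump error_allowed)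

-- ===== LEMMAS AND PROOFS =====

-- firstBad = none iff every adjacent pair is ok
theorem pvFirstBad_none_iff (ok : Int → Int → Bool) (lvl : List Int) :
    pvFirstBad ok lvl = none ↔
      ∀ k, k + 1 < lvl.length → ok (lvl.getD k 0) (lvl.getD (k+1) 0) = true := by
  induction lvl with
  | nil => simp [pvFirstBad]
  | cons a rest ih =>
    cases rest with
    | nil => simp [pvFirstBad]
    | cons b rest' =>
      rw [pvFirstBad]
      constructor
      · intro h k hk
        by_cases hab : ok a b = true
        · simp [hab, Option.map_eq_none_iff] at h
          cases k with
          | zero => simpa using hab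
          | succ k' =>
            have := (ih.mp h) k' (by simpa using hk)
            simpa using this
        · simp [hab] at h
      · intro h
        have hab : ok a b = true := by simpa using h 0 (by simp)
        have hrest : pvFirstBad ok (b :: rest') = none := by
          apply ih.mpr
          intro k hk
          have := h (k+1) (by simpa using hk)
          simpa using this
        simp [hab, hrest]

-- firstBad = some i gives a concrete bad pair
theorem pvFirstBad_some (ok : Int → Int → Bool) (lvl : List Int) (i : Nat)
    (h : pvFirstBad ok lvl = some i) :
    i + 1 < lvl.length ∧ ok (lvl.getD i 0) (lvl.getD (i+1) 0) = false := by
  induction lvl generalizing i with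
  | nil => simp [pvFirstBad] at h
  | cons a rest ih =>
    cases rest with
    | nil => simp [pvFirstBad] at h
    | cons b rest' =>
      rw [pvFirstBad] at h
      by_cases hab : ok a b = true
      · simp [hab, Option.map_eq_some_iff] at h
        obtain ⟨j, hj, rfl⟩ := h
        have := ih j hj
        constructor
        · simpa using this.1
        · simpa using this.2
      · simp [hab] at h
        subst h
        simp [Bool.eq_false_iff.mpr hab]

-- firstBad isNone = all-pairs boolean over the zip
theorem pvFirstBad_isNone_eq_all (ok : Int → Int → Bool) (lvl : List Int) :
    (pvFirstBad ok lvl).isNone = (lvl.zip (lvl.drop 1)).all (fun p => ok p.1 p.2) := by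
  induction lvl with
  | nil => simp [pvFirstBad]
  | cons a rest ih =>
    cases rest with
    | nil => simp [pvFirstBad]
    | cons b rest' =>
      rw [pvFirstBad]
      by_cases hab : ok a b = true
      · have ih' := ih
        simp only [List.drop_succ_cons, List.drop_zero] at ih'
        simp [hab, ih']
      · simp [hab]

-- A's safety condition (monotonic && in_bounds) equals B's safe0
theorem A_cond_eq (lvl : List Int) (mj Mj : Int) :
    ((((lvl.zip (lvl.drop 1)).map (fun p => p.2 - p.1)).all (fun v => decide (0 ≤ v)) ||
      ((lvl.zip (lvl.drop 1)).map (fun p => p.2 - p.1)).all (fun v => decide (v ≤ 0))) &&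
      ((lvl.zip (lvl.drop 1)).map (fun p => p.2 - p.1)).all
        (fun v => decide (mj ≤ |v|) && decide (|v| ≤ Mj)))
    = pvSafe0 mj Mj lvl := by
  unfold pvSafe0
  rw [pvFirstBad_isNone_eq_all, pvFirstBad_isNone_eq_all]
  simp only [List.all_map, Function.comp_def]
  unfold pvOkUp pvOkDown
  apply Bool.eq_iff_iff.mpr
  simp only [Bool.and_eq_true, Bool.or_eq_true, List.all_eq_true, decide_eq_true_iff]
  constructor
  · rintro ⟨h1 | h1, h2⟩
    · exact Or.inl (fun x hx => ⟨h1 x hx, h2 x hx⟩)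
    · exact Or.inr (fun x hx => ⟨h1 x hx, h2 x hx⟩)
  · rintro (h | h)
    · exact ⟨Or.inl (fun x hx => (h x hx).1), fun x hx => (h x hx).2⟩
    · exact ⟨Or.inr (fun x hx => (h x hx).1), fun x hx => (h x hx).2⟩

-- A with error_allowed = false computes exactly safe0
theorem A_false_eq (lvl : List Int) (mj Mj : Int) :
    pvA_level_is_safe lvl mj Mj false = pvSafe0 mj Mj lvl := by
  rw [pvA_level_is_safe]
  simp only [A_cond_eq]
  cases pvSafe0 mj Mj lvl <;> simp

-- getD through eraseIdx
theorem getD_eraseIdx (l : List Int) (i k : Nat) :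
    (l.eraseIdx i).getD k 0 = if k < i then l.getD k 0 else l.getD (k+1) 0 := by
  simp only [List.getD_eq_getElem?_getD, List.getElem?_eraseIdx]
  split <;> rfl

-- if a bad adjacent pair of lvl is not touched by deleting index j, it survives in the result
theorem pair_survives (lvl : List Int) (j iu : Nat) (hj : j < lvl.length)
    (hiu : iu + 1 < lvl.length) (h1 : j ≠ iu) (h2 : j ≠ iu + 1) :
    ∃ k, k + 1 < (lvl.eraseIdx j).length ∧
      (lvl.eraseIdx j).getD k 0 = lvl.getD iu 0 ∧
      (lvl.eraseIdx j).getD (k+1) 0 = lvl.getD (iu+1) 0 := by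
  have hlen : (lvl.eraseIdx j).length = lvl.length - 1 := by
    rw [List.length_eraseIdx]; simp [hj]
  rcases Nat.lt_or_ge j iu with hlt | hge
  · refine ⟨iu - 1, ?_, ?_, ?_⟩
    · omega
    · rw [getD_eraseIdx]
      have hnot : ¬ (iu - 1 < j) := by omega
      have he : iu - 1 + 1 = iu := by omega
      simp [hnot, he]
    · rw [getD_eraseIdx]
      have hnot : ¬ (iu - 1 + 1 < j) := by omega
      have he : iu - 1 + 1 + 1 = iu + 1 := by omega
      simp [hnot, he]
  · have hgt : iu + 1 < j := by omega
    refine ⟨iu, by omega, ?_, ?_⟩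
    · rw [getD_eraseIdx]; simp [show iu < j from by omega]
    · rw [getD_eraseIdx]; simp [show iu + 1 < j from by omega]

-- the main per-level equivalence
theorem safe_eq (lvl : List Int) (mj Mj : Int) (ea : Bool) :
    pvA_level_is_safe lvl mj Mj ea = pvB_safe lvl mj Mj ea := by
  rw [pvA_level_is_safe]
  simp only [A_cond_eq]
  unfold pvB_safe
  cases hu : pvFirstBad (pvOkUp mj Mj) lvl with
  | none => simp [pvSafe0, hu]
  | some iu =>
    cases hd : pvFirstBad (pvOkDown mj Mj) lvl with
    | none => simp [pvSafe0, hd]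
    | some idn =>
      have hc : pvSafe0 mj Mj lvl = false := by simp [pvSafe0, hu, hd]
      rw [hc]
      simp only [if_false, Bool.false_eq_true]
      cases ea with
      | false => simp
      | true =>
        simp only [if_true]
        have hbadu := pvFirstBad_some _ _ _ hu
        have hbadd := pvFirstBad_some _ _ _ hd
        simp only [A_false_eq]
        apply Bool.eq_iff_iff.mpr
        simp only [List.any_eq_true, List.mem_range, List.mem_cons]
        constructor
        · rintro ⟨i, hi, hsafe⟩
          refine ⟨i, ?_, ?_⟩
          · -- i must be one of the four candidates
            have hsafe' := hsafe
            unfold pvSafe0 at hsafe'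
            rw [Bool.or_eq_true, Option.isNone_iff_eq_none, Option.isNone_iff_eq_none] at hsafe'
            rw [← List.eraseIdx_eq_take_drop_succ] at hsafe'
            rcases hsafe' with hup | hdown
            · -- all pairs of the erased list are up-ok, so i ∈ {iu, iu+1}
              by_contra hcand
              push_neg at hcand
              obtain ⟨h1, h2, -, -, -⟩ := hcand
              obtain ⟨k, hk, e1, e2⟩ := pair_survives lvl i iu hi hbadu.1 h1 h2
              have := (pvFirstBad_none_iff _ _).mp hup k hk
              rw [e1, e2] at this
              rw [hbadu.2] at this
              exact Bool.false_ne_true this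
            · by_contra hcand
              push_neg at hcand
              obtain ⟨-, -, h1, h2, -⟩ := hcand
              obtain ⟨k, hk, e1, e2⟩ := pair_survives lvl i idn hi hbadd.1 h1 h2
              have := (pvFirstBad_none_iff _ _).mp hdown k hk
              rw [e1, e2] at this
              rw [hbadd.2] at this
              exact Bool.false_ne_true this
          · exact hsafe
        · rintro ⟨j, hj, hsafe⟩
          refine ⟨j, ?_, hsafe⟩
          rcases hj with rfl | rfl | rfl | rfl | h
          · omega
          · exact hbadu.1
          · omega
          · exact hbadd.1
          · cases h

-- ===== VERDICT (by name: the statement is the Claim_ definition above) =====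
theorem monotonic_within_jump_num_sat_spec : Claim_equal_monotonic_within_jump_num_sat := by
  intro levels mj Mj ea _
  unfold Spec_monotonic_within_jump_num_sat
  unfold monotonic_within_jump_num_sat monotonic_within_jump_num_sat_alt
  simp only [safe_eq]
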